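-- pv_equiv track=rewrite | github.com/Snailman03/Command_line_test | CommandLineTest_1.py | validate_options
-- ===== SOURCE A (Python) =====
-- def validate_options(options):
--     if len(options) > 3:
--         return False
--     for option in options:
--         if not option.startswith('-'):
--             return False
--         if '--' in option and len(option.split('=')) > 2:
--             return False
--         if any(char in option for char in '!@#$%^&*()+=[]{}|;:",<>?/'):
--             return False
--     return True
-- ===== SOURCE B (Python) =====
-- _FORBIDDEN = frozenset('!@#$%^&*()+=[]{}|;:",<>?/')
--
-- def validate_options(options):
--     # Stage 1: at most three options.
--     if len(options) > 3:
--         return False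
--     # Stage 2: every option starts with '-'.
--     if not all(option.startswith('-') for option in options):
--         return False
--     # Stage 3: pool every character of every option into one string and test
--     # set-disjointness with the forbidden set once, globally.  ('=' is
--     # forbidden, so A's '--'/split('=') branch is subsumed by this test.)
--     return _FORBIDDEN.isdisjoint(''.join(options))
-- ===== Notes on version B (the rewrite author's own statement) =====
-- stated objective: alternative
-- what changed: A runs one early-return loop doing three checks per option (startswith, a redundant double-dash/split-on-equals branch that is subsumed because '=' is itself forbidden, and a per-option forbidden-character scan); B validates in independent stages: a count check, a prefix pass, and then a single global set-disjointness test between the frozenset of forbidden characters and the pool of all characters of all options joined into one string, so no per-option forbidden scan and no early-return loop remain.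
import Mathlib
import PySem

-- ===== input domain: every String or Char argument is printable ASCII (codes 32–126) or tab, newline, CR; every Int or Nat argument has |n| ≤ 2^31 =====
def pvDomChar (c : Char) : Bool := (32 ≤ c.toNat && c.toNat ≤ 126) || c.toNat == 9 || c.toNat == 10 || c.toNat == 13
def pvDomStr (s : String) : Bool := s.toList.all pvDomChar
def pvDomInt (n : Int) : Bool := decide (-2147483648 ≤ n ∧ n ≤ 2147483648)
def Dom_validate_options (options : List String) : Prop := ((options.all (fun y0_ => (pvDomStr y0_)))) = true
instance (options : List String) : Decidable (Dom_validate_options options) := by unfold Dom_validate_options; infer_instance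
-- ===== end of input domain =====

-- B replaces A's single early-return loop (three checks per option; the '--'/split('=')
-- branch is subsumed since '=' is forbidden) by staged passes: count check, prefix pass,
-- then ONE global set-disjointness test between the forbidden set and all pooled characters.

-- ===== PORT A =====
-- the forbidden-character string A scans
def pvForbiddenA : List Char := "!@#$%^&*()+=[]{}|;:\",<>?/".toList

-- the for-loop of A: early return False, else continue
def pvLoopA : List String → Bool
  | [] => true
  | option :: rest =>
    if !(PySem.Str.startswith option "-") then false
    else if PySem.Str.isIn "--" option && decide ((PySem.Chars.splitOn option.toList ['=']).length > 2) then false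
    else if pvForbiddenA.any (fun c => option.toList.contains c) then false
    else pvLoopA rest

def validate_options (options : List String) : Bool :=
  if options.length > 3 then false else pvLoopA options

-- ===== PORT B =====
-- the frozenset of forbidden characters (the literal's characters are pairwise distinct)
def pvForbiddenB : PySem.Set Char := PySem.Set.ofList "!@#$%^&*()+=[]{}|;:\",<>?/".toList

-- ''.join(options): all characters of all options pooled into one string
def pvJoinedB (options : List String) : List Char := (options.map String.toList).flatten

def validate_options_alt (options : List String) : Bool :=
  if options.length > 3 then false
  else if !(options.all (fun o => PySem.Str.startswith o "-")) then false
  else pvForbiddenB.all (fun c => !((pvJoinedB options).contains c))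

-- ===== PRECONDITION & SPEC =====
def Spec_validate_options (options : List String) (out : Bool) : Prop := out = validate_options_alt options
instance (options : List String) (out : Bool) : Decidable (Spec_validate_options options out) := by unfold Spec_validate_options; infer_instance

-- ===== CLAIM (what is proved, stated in full; the proofs are below) =====
def Claim_equal_validate_options : Prop := ∀ (options : List String), Dom_validate_options options → Spec_validate_options options (validate_options options)

-- ===== LEMMAS AND PROOFS =====

-- splitOn.go never splits when the separator character does not occur in the rest of the input
theorem pvSplitOn_go_no_sep (l : List Char) (h : '=' ∉ l) :
    ∀ (fuel : Nat), l.length < fuel → ∀ (cur : List Char) (acc : List (List Char)),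
      PySem.Chars.splitOn.go ['='] fuel l cur acc = ((cur.reverse ++ l) :: acc).reverse := by
  induction l with
  | nil =>
    intro fuel hf cur acc
    cases fuel with
    | zero => omega
    | succ n => simp [PySem.Chars.splitOn.go]
  | cons c rest ih =>
    intro fuel hf cur acc
    cases fuel with
    | zero => simp at hf
    | succ n =>
      have hc : c ≠ '=' := fun hh => h (hh ▸ List.mem_cons_self)
      have hpre : List.isPrefixOf ['='] (c :: rest) = false := by
        simp [List.isPrefixOf]
        exact fun hh => hc hh.symm
      rw [PySem.Chars.splitOn.go]
      simp only [hpre, Bool.false_eq_true, if_false]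
      have := ih (fun hm => h (List.mem_cons_of_mem _ hm)) n
        (by simpa using Nat.lt_of_succ_lt_succ hf) (c :: cur) acc
      rw [this]
      simp

theorem pvSplitOn_no_sep (s : List Char) (h : '=' ∉ s) :
    PySem.Chars.splitOn s ['='] = [s] := by
  unfold PySem.Chars.splitOn
  rw [pvSplitOn_go_no_sep s h (s.length + 1) (by omega) [] []]
  simp

-- "clean" = no forbidden character occurs in the option
def pvClean (l : List Char) : Bool := l.all (fun c => !pvForbiddenA.contains c)

-- per-option equivalence, at the character-list level:
-- A's chain of three checks equals (starts with '-') && clean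
theorem pvElem_chars (l : List Char) :
    (if !(PySem.Chars.startswith l ['-']) then false
     else if PySem.Chars.isIn ['-', '-'] l && decide ((PySem.Chars.splitOn l ['=']).length > 2) then false
     else if pvForbiddenA.any (fun c => l.contains c) then false
     else true) = (PySem.Chars.startswith l ['-'] && pvClean l) := by
  match l with
  | [] => decide
  | c :: rest =>
    by_cases hc : PySem.Chars.startswith (c :: rest) ['-'] = true
    · rw [hc]
      simp only [Bool.not_true, Bool.false_eq_true, if_false, Bool.true_and]
      have hcdash : '-' = c := by
        simpa [PySem.Chars.startswith, List.isPrefixOf] using hc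
      subst hcdash
      by_cases hbad : ∃ x ∈ ('-' :: rest : List Char), x ∈ pvForbiddenA
      · obtain ⟨x, hxr, hxf⟩ := hbad
        have h3 : pvForbiddenA.any (fun c => ('-' :: rest).contains c) = true := by
          refine List.any_eq_true.mpr ⟨x, hxf, ?_⟩
          simp [List.contains_eq_mem, hxr]
        have hm : pvClean ('-' :: rest) = false := by
          refine List.all_eq_false.mpr ⟨x, hxr, ?_⟩
          simp [List.contains_eq_mem, hxf]
        rw [hm, h3]
        split <;> rfl
      · push Not at hbad
        have hne : '=' ∉ ('-' :: rest : List Char) := fun hm =>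
          hbad '=' hm (by decide)
        have h2 : decide ((PySem.Chars.splitOn ('-' :: rest) ['=']).length > 2) = false := by
          rw [pvSplitOn_no_sep _ hne]; simp
        have h3 : pvForbiddenA.any (fun c => ('-' :: rest).contains c) = false := by
          refine List.any_eq_false.mpr ?_
          intro x hxf
          simp only [List.contains_eq_mem, decide_eq_true_eq]
          exact fun hmem => hbad x hmem hxf
        have hrhs : pvClean ('-' :: rest) = true := by
          refine List.all_eq_true.mpr ?_
          intro x hxr
          simp only [Bool.not_eq_eq_eq_not, Bool.not_true, List.contains_eq_mem,
            decide_eq_false_iff_not]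
          exact fun hmem => hbad x hxr hmem
        rw [h2, Bool.and_false]
        simp only [Bool.false_eq_true, if_false]
        rw [h3]
        simp only [Bool.false_eq_true, if_false]
        exact hrhs.symm
    · rw [Bool.eq_false_iff.mpr hc]
      simp

-- A's loop equals: every option starts with '-' AND every option is clean
theorem pvLoopA_eq (l : List String) :
    pvLoopA l = (l.all (fun o => PySem.Str.startswith o "-") && l.all (fun o => pvClean o.toList)) := by
  induction l with
  | nil => rfl
  | cons o rest ih =>
    have he := pvElem_chars o.toList
    have hs : PySem.Str.startswith o "-" = PySem.Chars.startswith o.toList ['-'] := by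
      rw [PySem.Str.startswith_eq]; rfl
    have hi : PySem.Str.isIn "--" o = PySem.Chars.isIn ['-', '-'] o.toList := by
      rw [PySem.Str.isIn_eq]; rfl
    simp only [pvLoopA, List.all_cons, hs, hi, ih]
    split_ifs with h1 h2 h3
    · simp only [Bool.not_eq_eq_eq_not, Bool.not_true] at h1
      simp [h1]
    · rw [if_neg (by simp [h1]), if_pos h2] at he
      rcases Bool.and_eq_false_iff.mp he.symm with h | h <;> simp [h]
    · rw [if_neg (by simp [h1]), if_neg h2, if_pos h3] at he
      rcases Bool.and_eq_false_iff.mp he.symm with h | h <;> simp [h]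
    · rw [if_neg (by simp [h1]), if_neg h2, if_neg h3] at he
      have he2 := he.symm
      simp only [Bool.and_eq_true] at he2
      obtain ⟨hsw, hcl⟩ := he2
      rw [hsw, hcl]
      simp

-- every option clean ↔ the pooled character list is clean
theorem pvClean_flatten (options : List String) :
    options.all (fun o => pvClean o.toList) = pvClean (pvJoinedB options) := by
  unfold pvJoinedB pvClean
  rw [List.all_flatten, List.all_map]
  rfl

-- disjointness is symmetric at the Bool level
theorem pvDisjoint_comm (a b : List Char) :
    a.all (fun c => !b.contains c) = b.all (fun c => !a.contains c) := by
  rw [Bool.eq_iff_iff]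
  simp only [List.all_eq_true, Bool.not_eq_eq_eq_not, Bool.not_true, List.contains_eq_mem,
    decide_eq_false_iff_not]
  exact ⟨fun h x hx hm => h x hm hx, fun h x hx hm => h x hm hx⟩

-- the frozenset's element list is exactly A's forbidden-character list (all distinct)
theorem pvForbiddenB_toList : pvForbiddenB = pvForbiddenA := by decide

-- ===== VERDICT (by name: the statement is the Claim_ definition above) =====
theorem validate_options_spec : Claim_equal_validate_options := by
  intro options _
  unfold Spec_validate_options validate_options validate_options_alt
  by_cases h : options.length > 3
  · simp [h]
  · rw [if_neg h, if_neg h, pvLoopA_eq]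
    by_cases hp : options.all (fun o => PySem.Str.startswith o "-") = true
    · rw [hp, Bool.true_and, Bool.not_true]
      simp only [Bool.false_eq_true, if_false]
      rw [pvClean_flatten, pvForbiddenB_toList]
      unfold pvClean
      exact pvDisjoint_comm _ _
    · rw [Bool.eq_false_iff.mpr hp]
      simp
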